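-- pv_equiv track=rewrite | github.com/chyjuls/EDX_Python-Fundamentals | edXExtraUnitPractice_2.py | interpretCashier
-- ===== SOURCE A (Python) =====
-- def interpretCashier(a_string):
--     # if a_string.isnumeric():
--     # return "PIN"
--     # elif a_string.isdecimal():
--     # return "Transaction"
--
--     # else:
--     # return "Password"
--
--     numlist = ["0", "1", "2", "3", "4", "5", "6", "7", "8", "9"]
--     allnumber = False
--     foundchara = False
--     i = 0
--     for chara in a_string:
--         if chara in numlist:
--             allnumber = True
--         else:
--             foundchara = True
--             nextchara = a_string[i + 1]
--             break
--         i += 1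
--     if foundchara == True and chara == "." and nextchara != ".":
--         return "Transaction"
--     elif foundchara == False and allnumber == True:
--         return "PIN"
--     else:
--         return "Password"
-- ===== SOURCE B (Python) =====
-- def interpretCashier(a_string):
--     head, sep, tail = a_string.partition(".")
--     digits = "0123456789"
--     if all(c in digits for c in a_string):
--         return "PIN" if a_string else "Password"
--     if sep and all(c in digits for c in head) and not tail.startswith("."):
--         return "Transaction"
--     return "Password"
-- ===== Notes on version B (the rewrite author's own statement) =====
-- stated objective: simpler
-- what changed: Instead of scanning for the first non-digit with allnumber/foundchara flags and a running index, B partitions the string at its first '.' and classifies from the three pieces: PIN iff the whole string is digits and nonempty, Transaction iff a '.' exists, everything before it is digits, and the tail does not start with '.', else Password.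
-- outside the precondition, e.g. on interpretCashier('.'): A raises IndexError, B returns 'Transaction'
import Mathlib
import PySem

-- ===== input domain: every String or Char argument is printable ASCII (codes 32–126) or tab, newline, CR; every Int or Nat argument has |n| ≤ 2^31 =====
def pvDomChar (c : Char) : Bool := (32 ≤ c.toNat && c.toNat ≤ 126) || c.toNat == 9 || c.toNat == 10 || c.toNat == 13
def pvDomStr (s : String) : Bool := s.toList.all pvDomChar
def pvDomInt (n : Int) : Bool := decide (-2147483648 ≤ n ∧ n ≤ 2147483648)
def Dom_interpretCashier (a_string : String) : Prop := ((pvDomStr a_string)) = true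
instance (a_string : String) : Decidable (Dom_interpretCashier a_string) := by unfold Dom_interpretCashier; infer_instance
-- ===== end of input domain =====

-- B drops A's flag-carrying scan for the first non-digit: it partitions the string at the first
-- '.' and classifies from the three pieces (simpler); return values agree wherever A returns.

-- ===== PORT A =====
-- chara in numlist  (numlist = ["0",…,"9"])
def pvIsNum (c : Char) : Bool :=
  decide (c ∈ ['0', '1', '2', '3', '4', '5', '6', '7', '8', '9'])

-- The for-loop with its break, plus the final if/elif/else.  State: the remaining characters,
-- the running index i into the full string, and the allnumber flag.  On break (first non-digit
-- chara at index i) the code reads nextchara = a_string[i+1] (PySem.Str.pyGet?; none = the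
-- IndexError, excluded by Pre_; "" stands for the raise) and returns the first branch's answer;
-- when the loop completes, foundchara is False so only the PIN/Password branches are reachable.
def interpretCashierGo (a_string : String) : List Char → Int → Bool → String
  | [], _, allnumber => if allnumber then "PIN" else "Password"
  | chara :: rest, i, _allnumber =>
    if pvIsNum chara then interpretCashierGo a_string rest (i + 1) true
    else
      match PySem.Str.pyGet? a_string (i + 1) with
      | none => ""  -- IndexError (excluded by Pre_)
      | some nextchara =>
        if chara = '.' ∧ nextchara ≠ '.' then "Transaction" else "Password"

def interpretCashier (a_string : String) : String :=
  interpretCashierGo a_string a_string.toList 0 false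

-- ===== PORT B =====
-- digits = "0123456789"
def pvDigitsB : List Char := "0123456789".toList

-- head, sep, tail = a_string.partition("."): exact — head = the characters before the first '.',
-- sep is nonempty iff a '.' occurs, in which case sepTail = '.' :: tail.
-- tail.startswith(".") for the one-character prefix "." is exactly tail.head? = some '.'.
def interpretCashier_alt (a_string : String) : String :=
  let ts := a_string.toList
  let head := ts.takeWhile (fun c => c ≠ '.')
  let sepTail := ts.dropWhile (fun c => c ≠ '.')
  if ts.all (fun c => decide (c ∈ pvDigitsB)) then
    if a_string = "" then "Password" else "PIN"
  else
    match sepTail with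
    | [] => "Password"          -- sep == ""
    | _ :: tail =>
      if head.all (fun c => decide (c ∈ pvDigitsB)) ∧ ¬ (tail.head? = some '.') then
        "Transaction"
      else "Password"

-- ===== PRECONDITION & SPEC =====
-- A raises IndexError (a_string[i+1]) exactly when the first non-digit character is the last
-- character of the string; Pre_ excludes those inputs.
def Pre_interpretCashier (a_string : String) : Prop :=
  (a_string.toList.dropWhile pvIsNum).length ≠ 1
instance (a_string : String) : Decidable (Pre_interpretCashier a_string) := by
  unfold Pre_interpretCashier; infer_instance

def pvWitness_interpretCashier : String := "12.5"

def Spec_interpretCashier (a_string : String) (out : String) : Prop := out = interpretCashier_alt a_string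
instance (a_string : String) (out : String) : Decidable (Spec_interpretCashier a_string out) := by unfold Spec_interpretCashier; infer_instance

-- ===== CLAIM (what is proved, stated in full; the proofs are below) =====
def Claim_equal_interpretCashier : Prop := ∀ (a_string : String), Dom_interpretCashier a_string → Pre_interpretCashier a_string → Spec_interpretCashier a_string (interpretCashier a_string)

-- ===== LEMMAS AND PROOFS =====

-- Intermediate characterisation of A's loop: strip the leading digits, then decide from the suffix.
def pvSpec0 (a_string : String) : String :=
  let rest := a_string.toList.dropWhile pvIsNum
  match rest with
  | [] => if a_string = "" then "Password" else "PIN"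
  | r0 :: _ =>
    match PySem.List.pyGet? rest 1 with
    | none => ""
    | some nextchara =>
      if r0 = '.' ∧ nextchara ≠ '.' then "Transaction" else "Password"

theorem interpretCashierGo_eq (a_string : String) (pre rest : List Char)
    (hfull : a_string.toList = pre ++ rest)
    (hpre : ∀ c ∈ pre, pvIsNum c = true) :
    interpretCashierGo a_string rest (pre.length : Int) (!pre.isEmpty)
      = pvSpec0 a_string := by
  induction rest generalizing pre with
  | nil =>
    have hdrop : a_string.toList.dropWhile pvIsNum = [] := by
      rw [hfull]; simpa using List.dropWhile_eq_nil_iff.mpr (by simpa using hpre)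
    simp only [interpretCashierGo, pvSpec0, hdrop]
    have hempty : a_string = "" ↔ pre = [] := by
      constructor
      · intro h; simpa [h] using hfull.symm
      · intro h
        have h2 : a_string.toList = [] := by simp [hfull, h]
        exact String.toList_eq_nil_iff.mp h2
    rcases Decidable.em (pre = []) with h | h
    · simp [h, hempty.mpr h]
    · have : a_string ≠ "" := fun hc => h (hempty.mp hc)
      simp [h, this]
  | cons c rest ih =>
    simp only [interpretCashierGo]
    by_cases hc : pvIsNum c = true
    · rw [if_pos hc]
      have := ih (pre ++ [c])
        (by simpa using hfull)
        (by intro x hx; rcases List.mem_append.mp hx with h | h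
            · exact hpre x h
            · simp_all)
      have h2 : ((pre ++ [c]).length : Int) = (pre.length : Int) + 1 := by
        simp
      have h3 : (pre ++ [c]).isEmpty = false := by simp
      rw [h2, h3] at this
      simpa using this
    · have hdrop : a_string.toList.dropWhile pvIsNum = c :: rest := by
        rw [hfull, List.dropWhile_append]
        have : pre.dropWhile pvIsNum = [] := List.dropWhile_eq_nil_iff.mpr (by simpa using hpre)
        simp [this, hc]
      have hget : PySem.Str.pyGet? a_string ((pre.length : Int) + 1)
          = PySem.List.pyGet? (c :: rest) 1 := by
        have h1 : PySem.Str.pyGet? a_string ((pre.length : Int) + 1)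
            = PySem.List.pyGet? a_string.toList ((pre.length : Int) + 1) := by
          simp [PySem.Str.pyGet?]
        rw [h1, hfull]
        have h2 : PySem.List.pyGet? (pre ++ c :: rest) ((pre.length : Int) + 1)
            = rest[1 - 1]? := by
          have := PySem.List.pyGet?_append_right (pre := pre) (ys := c :: rest) (k := 1)
          simpa using this
        have h3 : PySem.List.pyGet? (c :: rest) 1 = rest[0]? := by
          cases rest <;> simp [PySem.List.pyGet?, PySem.List.pyIdx?]
        rw [h2, h3]
      rw [if_neg hc, hget]
      simp only [pvSpec0, hdrop]

theorem mem_digitsB (c : Char) : decide (c ∈ pvDigitsB) = pvIsNum c := by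
  have : pvDigitsB = ['0','1','2','3','4','5','6','7','8','9'] := by rfl
  simp [this, pvIsNum]

theorem dropWhile_head_false {α : Type} (p : α → Bool) (l : List α) (c : α) (r : List α)
    (h : l.dropWhile p = c :: r) : p c = false := by
  induction l with
  | nil => simp [List.dropWhile] at h
  | cons a t ih =>
    rw [List.dropWhile_cons] at h
    by_cases hp : p a = true
    · rw [if_pos hp] at h; exact ih h
    · rw [if_neg hp] at h
      obtain ⟨rfl, -⟩ := List.cons.injEq .. ▸ h |> (by simpa using ·)
      simpa using hp

theorem all_digitsB_eq (l : List Char) :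
    (l.all (fun c => decide (c ∈ pvDigitsB))) = l.all pvIsNum := by
  simp only [mem_digitsB]

theorem spec0_eq_alt (a_string : String) (h : Pre_interpretCashier a_string) :
    pvSpec0 a_string = interpretCashier_alt a_string := by
  unfold Pre_interpretCashier at h
  unfold pvSpec0 interpretCashier_alt
  simp only [all_digitsB_eq]
  cases hd : a_string.toList.dropWhile pvIsNum with
  | nil =>
    have hall : a_string.toList.all pvIsNum = true :=
      List.all_eq_true.mpr (by simpa using List.dropWhile_eq_nil_iff.mp hd)
    simp [hall]
  | cons c rest =>
    have hc : pvIsNum c = false := dropWhile_head_false _ _ _ _ hd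
    have hsplit : a_string.toList = a_string.toList.takeWhile pvIsNum ++ c :: rest := by
      conv_lhs => rw [← List.takeWhile_append_dropWhile (p := pvIsNum) (l := a_string.toList)]
      rw [hd]
    have hptw : ∀ x ∈ a_string.toList.takeWhile pvIsNum, pvIsNum x = true :=
      fun x hx => List.mem_takeWhile_imp hx
    have hrest : rest ≠ [] := by
      intro hr; rw [hd, hr] at h; simp at h
    have hall : a_string.toList.all pvIsNum = false := by
      rw [hsplit]
      simp [hc]
    rw [hall]
    simp only [Bool.false_eq_true, if_false]
    set p := a_string.toList.takeWhile pvIsNum with hp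
    have hpdot : ∀ x ∈ p, (fun c => decide (c ≠ '.')) x = true := by
      intro x hx
      have hxnum := hptw x hx
      have : x ≠ '.' := by
        intro hxe; rw [hxe] at hxnum; simp [pvIsNum] at hxnum
      simpa using this
    obtain ⟨r0, rtail, rfl⟩ := List.exists_cons_of_ne_nil hrest
    by_cases hcdot : c = '.'
    · subst hcdot
      have htw : a_string.toList.takeWhile (fun c => decide (c ≠ '.')) = p := by
        rw [hsplit, List.takeWhile_append]
        rw [List.takeWhile_eq_self_iff.mpr hpdot]
        simp
      have hdw : a_string.toList.dropWhile (fun c => decide (c ≠ '.')) = '.' :: r0 :: rtail := by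
        rw [hsplit, List.dropWhile_append]
        rw [List.dropWhile_eq_nil_iff.mpr (by simpa using hpdot)]
        simp
      rw [htw, hdw]
      have hget : PySem.List.pyGet? ('.' :: r0 :: rtail) 1 = some r0 := by
        simp [PySem.List.pyGet?, PySem.List.pyIdx?]
      rw [hget]
      have hpall : p.all pvIsNum = true := List.all_eq_true.mpr hptw
      simp [hpall]
    · have htw : a_string.toList.takeWhile (fun c => decide (c ≠ '.')) =
          (p ++ [c]) ++ (c :: r0 :: rtail).tail.takeWhile (fun c => decide (c ≠ '.')) := by
        rw [hsplit]
        have hsplit2 : p ++ c :: r0 :: rtail = (p ++ [c]) ++ (r0 :: rtail) := by simp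
        rw [hsplit2, List.takeWhile_append]
        rw [List.takeWhile_eq_self_iff.mpr (by
          intro x hx
          rcases List.mem_append.mp hx with h1 | h1
          · exact hpdot x h1
          · simp at h1; subst h1; simpa using hcdot)]
        simp
      have hheadall : ((p ++ [c]) ++ (c :: r0 :: rtail).tail.takeWhile
          (fun c => decide (c ≠ '.'))).all pvIsNum = false := by
        simp [hc]
      have hget1 : PySem.List.pyGet? (c :: r0 :: rtail) 1 = some r0 := by
        simp [PySem.List.pyGet?, PySem.List.pyIdx?]
      rw [hget1, htw, hheadall]
      cases hdw : a_string.toList.dropWhile (fun c => decide (c ≠ '.')) with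
      | nil => simp [hcdot]
      | cons d dtail => simp [hcdot]

-- ===== VERDICT (by name: the statement is the Claim_ definition above) =====
theorem interpretCashier_spec : Claim_equal_interpretCashier := by
  intro a_string _ hpre
  unfold Spec_interpretCashier interpretCashier
  have := interpretCashierGo_eq a_string [] a_string.toList (by simp) (by simp)
  simpa using this.trans (spec0_eq_alt a_string hpre)
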